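-- pv_equiv track=rewrite | github.com/Law-AI/ilsic | Codes/Evaluation/match-data-RAG.py | normalize_identifier_token
-- ===== SOURCE A (Python) =====
-- def normalize_identifier_token(token: str) -> str:
--     result = []
--     for c in token:
--         if c in "([":
--             break
--         if c.isalnum():
--             result.append(c)
--     return "".join(result)
-- ===== SOURCE B (Python) =====
-- def normalize_identifier_token(token: str) -> str:
--     prefix = token.partition("(")[0].partition("[")[0]
--     return "".join(c for c in prefix if c.isalnum())
-- ===== Notes on version B (the rewrite author's own statement) =====
-- stated objective: simpler
-- what changed: Replaces the fused break-and-collect character loop by a truncate-then-filter decomposition: first isolate the prefix before the first '(' or '[' with two str.partition calls, then filter the prefix for alphanumeric characters.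
import Mathlib
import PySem

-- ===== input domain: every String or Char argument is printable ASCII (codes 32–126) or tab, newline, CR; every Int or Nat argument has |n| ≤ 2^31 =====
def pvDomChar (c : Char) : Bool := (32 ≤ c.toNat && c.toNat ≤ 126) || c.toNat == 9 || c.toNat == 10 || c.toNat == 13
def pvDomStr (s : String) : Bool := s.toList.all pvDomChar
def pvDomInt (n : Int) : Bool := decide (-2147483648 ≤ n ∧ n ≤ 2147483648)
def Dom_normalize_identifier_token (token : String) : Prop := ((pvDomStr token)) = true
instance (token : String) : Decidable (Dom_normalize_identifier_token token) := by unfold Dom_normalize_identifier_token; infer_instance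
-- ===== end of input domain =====

-- ===== PORT A =====
-- B truncates the token at the first '(' or '[' and then filters, instead of A's fused break-and-collect loop; objective: simpler.
-- A's for-loop with break, collecting isalnum chars into result.
def pvLoopA : List Char → List Char
  | [] => []
  | c :: cs =>
    if c == '(' || c == '[' then []                                  -- `if c in "([": break`
    else if PySem.Chars.isalnum c then c :: pvLoopA cs               -- `result.append(c)`
    else pvLoopA cs

def normalize_identifier_token (token : String) : String :=
  String.mk (pvLoopA token.toList)                                   -- `"".join(result)`

-- ===== PORT B =====
-- `s.partition(ch)[0]`: the characters before the first occurrence of ch (whole string if absent); exact.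
def pvPartitionHead (ch : Char) (cs : List Char) : List Char :=
  cs.takeWhile (fun c => c != ch)

def normalize_identifier_token_alt (token : String) : String :=
  String.mk ((pvPartitionHead '[' (pvPartitionHead '(' token.toList)).filter PySem.Chars.isalnum)

-- ===== PRECONDITION & SPEC =====
def Spec_normalize_identifier_token (token : String) (out : String) : Prop := out = normalize_identifier_token_alt token
instance (token : String) (out : String) : Decidable (Spec_normalize_identifier_token token out) := by unfold Spec_normalize_identifier_token; infer_instance

-- ===== CLAIM (what is proved, stated in full; the proofs are below) =====
def Claim_equal_normalize_identifier_token : Prop := ∀ (token : String), Dom_normalize_identifier_token token → Spec_normalize_identifier_token token (normalize_identifier_token token)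

-- ===== LEMMAS AND PROOFS =====

-- ===== LEMMAS =====
lemma pvLoopA_eq (cs : List Char) :
    pvLoopA cs = (pvPartitionHead '[' (pvPartitionHead '(' cs)).filter PySem.Chars.isalnum := by
  induction cs with
  | nil => rfl
  | cons c tl ih =>
    by_cases h1 : c = '('
    · subst h1; rfl
    · by_cases h2 : c = '['
      · subst h2; simp [pvLoopA, pvPartitionHead]
      · simp [pvLoopA, pvPartitionHead, h1, h2, List.filter_cons] at ih ⊢
        by_cases h3 : PySem.Chars.isalnum c <;> simp [h3, ih]

-- ===== VERDICT (by name: the statement is the Claim_ definition above) =====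
theorem normalize_identifier_token_spec : Claim_equal_normalize_identifier_token := by
  intro token _
  show _ = _
  simp [normalize_identifier_token, normalize_identifier_token_alt, pvLoopA_eq]
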